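-- pv_equiv track=rewrite | github.com/jonathanlangdon/ChallengeTraining | py/validate_battlefield.py | has_no_diagonal_ships
-- ===== SOURCE A (Python) =====
-- def has_no_diagonal_ships(field):
--     # no ships should be diagonal with another
--     for i in range(0, 9):
--         for j in range(1, 10):
--             if field[i][j] == 1 and field[i + 1][j - 1] == 1:
--                 return False
--             if field[i][j - 1] == 1 and field[i + 1][j] == 1:
--                 return False
--     return True
-- ===== SOURCE B (Python) =====
-- def has_no_diagonal_ships(field):
--     prev = {j for j, v in enumerate(field[0][:10]) if v == 1}
--     for i in range(1, 10):
--         cur = {j for j, v in enumerate(field[i][:10]) if v == 1}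
--         if any(c - 1 in cur or c + 1 in cur for c in prev):
--             return False
--         prev = cur
--     return True
-- ===== Notes on version B (the rewrite author's own statement) =====
-- stated objective: alternative
-- what changed: Instead of scanning every grid cell and indexing the four diagonal-neighbour cells, B streams over adjacent row pairs, building one set of ship columns per clipped row and testing each ship's two lower diagonal neighbours by set membership; Pre_ admits full 10x10 windows and ragged grids where A's scan meets a conflict before any out-of-range read, and excludes other ragged grids where A may raise IndexError (on a few of which A still returns False early, and B agrees - see cites).
-- outside the precondition, e.g. on has_no_diagonal_ships([[0, 0, 0, 0, 0, 0, 0, 0, 0, 0], [1, 0], [0, 1]]): A returns False, B returns False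
import Mathlib
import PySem

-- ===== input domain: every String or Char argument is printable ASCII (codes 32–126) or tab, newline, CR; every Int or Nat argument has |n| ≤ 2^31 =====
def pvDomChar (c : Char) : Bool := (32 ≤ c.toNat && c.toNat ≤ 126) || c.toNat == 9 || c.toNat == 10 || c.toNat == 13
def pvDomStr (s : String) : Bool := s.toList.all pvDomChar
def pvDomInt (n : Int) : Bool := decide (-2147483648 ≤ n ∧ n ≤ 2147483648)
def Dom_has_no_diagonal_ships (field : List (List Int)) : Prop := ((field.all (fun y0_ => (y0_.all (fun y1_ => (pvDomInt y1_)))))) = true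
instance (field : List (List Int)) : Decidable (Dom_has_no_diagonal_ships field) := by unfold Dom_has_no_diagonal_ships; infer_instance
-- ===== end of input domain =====

-- B builds the set of ship coordinates of the (clipped) 10x10 window once and checks each ship's
-- two lower diagonal neighbours by set membership, instead of A's scan over every grid cell with
-- neighbour indexing; cells missing from a ragged grid count as water.


-- ===== PORT A =====
-- field[i][j]; exact under Pre_ (wherever Python A performs a read that this port's value depends
-- on, the read is in range — see the comment at Pre_ below)
def pvCell (field : List (List Int)) (i j : Int) : Int :=
  PySem.List.pyGetD (PySem.List.pyGetD field i []) j 0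

def has_no_diagonal_ships (field : List (List Int)) : Bool :=
  !((PySem.List.pyRange 0 9 1).any (fun i =>
      (PySem.List.pyRange 1 10 1).any (fun j =>
        (pvCell field i j == 1 && pvCell field (i + 1) (j - 1) == 1) ||
        (pvCell field i (j - 1) == 1 && pvCell field (i + 1) j == 1))))

-- ===== PORT B =====
-- {j for j, v in enumerate(row[:10]) if v == 1}
def pvRowShips (row : List Int) : PySem.Set Int :=
  PySem.Set.ofList ((PySem.List.enumerate (PySem.List.slice row none (some 10))).filterMap
    (fun jv => if jv.2 == 1 then some jv.1 else none))

-- any(c - 1 in cur or c + 1 in cur for c in prev)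
def pvConflict (prev cur : PySem.Set Int) : Bool :=
  prev.any (fun c => PySem.Set.contains cur (c - 1) || PySem.Set.contains cur (c + 1))

-- the for-loop over i in range(1, 10) with early return False; field[i] is exact under Pre_
-- (wherever the loop reads a row before returning, the row exists)
def pvLoop (field : List (List Int)) (prev : PySem.Set Int) : List Int → Bool
  | [] => true
  | i :: rest =>
      let cur := pvRowShips (PySem.List.pyGetD field i [])
      if pvConflict prev cur then false else pvLoop field cur rest

def has_no_diagonal_ships_alt (field : List (List Int)) : Bool :=
  pvLoop field (pvRowShips (PySem.List.pyGetD field 0 [])) (PySem.List.pyRange 1 10 1)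

-- ===== PRECONDITION & SPEC =====
-- Pre_ admits grids with a full 10x10 window, and ragged grids on which A's scan meets a diagonal
-- conflict in some row pair before any out-of-range read (there A returns False); other ragged
-- grids are excluded because A's scan may hit an IndexError there — on a few of them A still
-- returns False early (see claim.json cites), and B agrees there too.
def Pre_has_no_diagonal_ships (field : List (List Int)) : Prop :=
  (10 ≤ field.length ∧ ∀ row ∈ field.take 10, 10 ≤ row.length) ∨
  (∃ k ∈ List.range 9, ∃ j ∈ List.range 10, 1 ≤ j ∧
     k + 2 ≤ field.length ∧
     (∀ r ∈ field.take k, 10 ≤ r.length) ∧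
     (if k = 0 then j + 1 ≤ (field.getD 0 []).length else 10 ≤ (field.getD k []).length) ∧
     j + 1 ≤ (field.getD (k + 1) []).length ∧
     (((field.getD k []).getD j 0 = 1 ∧ (field.getD (k + 1) []).getD (j - 1) 0 = 1) ∨
      ((field.getD k []).getD (j - 1) 0 = 1 ∧ (field.getD (k + 1) []).getD j 0 = 1)))
instance (field : List (List Int)) : Decidable (Pre_has_no_diagonal_ships field) := by
  unfold Pre_has_no_diagonal_ships; infer_instance

def pvWitness_has_no_diagonal_ships : List (List Int) := [[0, 1], [1, 0]]

def Spec_has_no_diagonal_ships (field : List (List Int)) (out : Bool) : Prop := out = has_no_diagonal_ships_alt field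
instance (field : List (List Int)) (out : Bool) : Decidable (Spec_has_no_diagonal_ships field out) := by unfold Spec_has_no_diagonal_ships; infer_instance

-- ===== CLAIM (what is proved, stated in full; the proofs are below) =====
def Claim_equal_has_no_diagonal_ships : Prop := ∀ (field : List (List Int)), Dom_has_no_diagonal_ships field → Pre_has_no_diagonal_ships field → Spec_has_no_diagonal_ships field (has_no_diagonal_ships field)

-- ===== LEMMAS AND PROOFS =====

-- membership in a row's ship set is "inside the first 10 columns and the cell reads 1"
lemma mem_ships (field : List (List Int)) (i c : Int) :
    c ∈ pvRowShips (PySem.List.pyGetD field i []) ↔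
      (0 ≤ c ∧ c < 10 ∧ pvCell field i c = 1) := by
  show _ ↔ (0 ≤ c ∧ c < 10 ∧ PySem.List.pyGetD (PySem.List.pyGetD field i []) c 0 = 1)
  generalize PySem.List.pyGetD field i [] = row
  unfold pvRowShips
  rw [PySem.Set.mem_ofList]
  have hsl : PySem.List.slice row none (some 10) = row.take 10 := by
    simpa using PySem.List.slice_to row (show (0 : Int) ≤ 10 by norm_num)
  simp only [hsl, List.mem_filterMap, PySem.List.mem_enumerate_iff]
  constructor
  · rintro ⟨jv, ⟨m, hm, rfl⟩, hp⟩
    simp only [List.length_take, lt_min_iff, List.getElem_take, zero_add] at hm hp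
    split at hp
    · rename_i hv
      rw [beq_iff_eq] at hv
      cases hp
      refine ⟨by omega, by omega, ?_⟩
      rw [PySem.List.pyGetD_of_nonneg _ _ (by omega : (0 : Int) ≤ ↑m), Int.toNat_natCast,
        List.getD_eq_getElem _ _ hm.2]
      exact hv
    · cases hp
  · rintro ⟨h1, h2, h3⟩
    rw [PySem.List.pyGetD_of_nonneg _ _ h1] at h3
    have hc : c.toNat < row.length := by
      by_contra h
      rw [List.getD_eq_default _ _ (by omega)] at h3
      exact absurd h3 (by norm_num)
    rw [List.getD_eq_getElem _ _ hc] at h3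
    refine ⟨(c, (1 : Int)), ⟨c.toNat, ?_, ?_⟩, by simp⟩
    · simp only [List.length_take, lt_min_iff]; exact ⟨by omega, hc⟩
    · exact Prod.ext_iff.mpr ⟨by omega, by simp [List.getElem_take, h3]⟩

-- a pvConflict hit is exactly a ship with an occupied lower-left or lower-right neighbour
lemma conflict_iff (field : List (List Int)) (a b : Int) :
    pvConflict (pvRowShips (PySem.List.pyGetD field a []))
               (pvRowShips (PySem.List.pyGetD field b [])) = true ↔
      ∃ c, (0 ≤ c ∧ c < 10 ∧ pvCell field a c = 1) ∧
        ((0 ≤ c - 1 ∧ c - 1 < 10 ∧ pvCell field b (c - 1) = 1) ∨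
         (0 ≤ c + 1 ∧ c + 1 < 10 ∧ pvCell field b (c + 1) = 1)) := by
  unfold pvConflict
  simp only [List.any_eq_true, PySem.Set.contains_iff, Bool.or_eq_true, mem_ships]

-- unrolling B's loop over range(1, 10): true iff no adjacent row pair conflicts
lemma alt_eq_any (field : List (List Int)) :
    has_no_diagonal_ships_alt field =
      !((PySem.List.pyRange 1 10 1).any (fun i =>
          pvConflict (pvRowShips (PySem.List.pyGetD field (i - 1) []))
                     (pvRowShips (PySem.List.pyGetD field i [])))) := by
  have hr : PySem.List.pyRange 1 10 1 = [1, 2, 3, 4, 5, 6, 7, 8, 9] := by decide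
  unfold has_no_diagonal_ships_alt
  rw [hr]
  norm_num [pvLoop, List.any_cons, List.any_nil]

-- the two ports agree on EVERY field: pvCell reads 1 exactly on present ship cells, which is
-- exactly membership in the clipped per-row ship-column sets B chains through its loop
lemma ports_agree (field : List (List Int)) :
    has_no_diagonal_ships field = has_no_diagonal_ships_alt field := by
  unfold has_no_diagonal_ships
  rw [alt_eq_any]
  congr 1
  rw [Bool.eq_iff_iff]
  simp only [List.any_eq_true, PySem.List.mem_pyRange_one, conflict_iff,
    Bool.or_eq_true, Bool.and_eq_true, beq_iff_eq]
  constructor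
  · rintro ⟨i, ⟨hi0, hi9⟩, j, ⟨hj1, hj10⟩, h⟩
    refine ⟨i + 1, ⟨by omega, by omega⟩, ?_⟩
    have e1 : pvCell field (i + 1 - 1) = pvCell field i := by congr 1; omega
    rcases h with ⟨ha, hb⟩ | ⟨ha, hb⟩
    · exact ⟨j, ⟨by omega, by omega, by rw [e1]; exact ha⟩,
        Or.inl ⟨by omega, by omega, hb⟩⟩
    · refine ⟨j - 1, ⟨by omega, by omega, by rw [e1]; exact ha⟩,
        Or.inr ⟨by omega, by omega, ?_⟩⟩
      have e2 : pvCell field (i + 1) (j - 1 + 1) = pvCell field (i + 1) j := by congr 1; omega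
      rw [e2]; exact hb
  · rintro ⟨i, ⟨hi1, hi10⟩, c, ⟨hc0, hc10, ha⟩, h⟩
    have e1 : pvCell field (i - 1 + 1) = pvCell field i := by congr 1; omega
    rcases h with ⟨h1, h2, hb⟩ | ⟨h1, h2, hb⟩
    · exact ⟨i - 1, ⟨by omega, by omega⟩, c, ⟨by omega, by omega⟩,
        Or.inl ⟨ha, by rw [e1]; exact hb⟩⟩
    · refine ⟨i - 1, ⟨by omega, by omega⟩, c + 1, ⟨by omega, by omega⟩,
        Or.inr ⟨?_, by rw [e1]; exact hb⟩⟩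
      have e3 : pvCell field (i - 1) (c + 1 - 1) = pvCell field (i - 1) c := by congr 1; omega
      rw [e3]; exact ha

-- ===== VERDICT (by name: the statement is the Claim_ definition above) =====
theorem has_no_diagonal_ships_spec : Claim_equal_has_no_diagonal_ships := by
  intro field _ _
  unfold Spec_has_no_diagonal_ships
  exact ports_agree field
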